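-- pv_equiv track=rewrite | github.com/sanjelarun/ParallelPy | examples/sql_join.py | alter_values
-- ===== SOURCE A (Python) =====
-- def alter_values(data_1, data_2):
--     data_3 = []
--     for i in data_1:
--         for j in data_2:
--             if i[0] == j[0]:
--                 sum_1 = i[1] + j[1]
--                 data_3.append((i[0] , sum_1)) # key, tuple
--     return data_3
-- ===== SOURCE B (Python) =====
-- def alter_values(data_1, data_2):
--     index = {}
--     for k, v in data_2:
--         index.setdefault(k, []).append(v)
--     return [(k, v + w) for k, v in data_1 for w in index.get(k, [])]
-- ===== Notes on version B (the rewrite author's own statement) =====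
-- stated objective: faster
-- what changed: Replaced the O(n*m) nested scan with a hash join: data_2 is grouped into a dict keyed by join key, then data_1 is scanned once, looking up its matches in the dict.
import Mathlib
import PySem

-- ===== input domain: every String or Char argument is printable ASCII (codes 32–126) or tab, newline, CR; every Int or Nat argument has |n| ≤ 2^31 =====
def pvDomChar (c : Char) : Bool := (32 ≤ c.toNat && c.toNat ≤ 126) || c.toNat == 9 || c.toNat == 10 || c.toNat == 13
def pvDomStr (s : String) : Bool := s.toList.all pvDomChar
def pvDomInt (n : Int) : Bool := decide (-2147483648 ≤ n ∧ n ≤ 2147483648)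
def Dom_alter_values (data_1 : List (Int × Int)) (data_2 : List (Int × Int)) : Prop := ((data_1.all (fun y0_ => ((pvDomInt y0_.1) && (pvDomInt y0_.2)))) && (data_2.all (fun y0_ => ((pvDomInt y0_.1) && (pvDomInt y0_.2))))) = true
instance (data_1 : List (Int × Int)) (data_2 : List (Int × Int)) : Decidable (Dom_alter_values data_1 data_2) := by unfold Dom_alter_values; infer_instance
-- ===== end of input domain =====

-- B replaces A's O(n·m) nested scan by a hash join (group data_2 by key, one pass over data_1): faster asymptotically, same output.


-- ===== PORT A =====
-- literal port of A: nested loops, appending (key, i[1]+j[1]) on every match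
def alter_values (data_1 : List (Int × Int)) (data_2 : List (Int × Int)) : List (Int × Int) :=
  data_1.foldl (fun data_3 i =>
    data_2.foldl (fun data_3 j =>
      if i.1 == j.1 then data_3 ++ [(i.1, i.2 + j.2)] else data_3) data_3) []

-- ===== PORT B =====
-- literal port of B: group data_2 by key into a dict (modify k [] (· ++ [v]) is exactly index.setdefault(k, []).append(v)), then one comprehension over data_1
def alter_values_alt (data_1 : List (Int × Int)) (data_2 : List (Int × Int)) : List (Int × Int) :=
  let index := data_2.foldl (fun d p => d.modify p.1 [] (· ++ [p.2])) PySem.Dict.empty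
  data_1.flatMap (fun p => (index.getD p.1 []).map (fun w => (p.1, p.2 + w)))

-- ===== PRECONDITION & SPEC =====
def Spec_alter_values (data_1 : List (Int × Int)) (data_2 : List (Int × Int)) (out : List (Int × Int)) : Prop := out = alter_values_alt data_1 data_2
instance (data_1 : List (Int × Int)) (data_2 : List (Int × Int)) (out : List (Int × Int)) : Decidable (Spec_alter_values data_1 data_2 out) := by unfold Spec_alter_values; infer_instance

-- ===== CLAIM (what is proved, stated in full; the proofs are below) =====
def Claim_equal_alter_values : Prop := ∀ (data_1 : List (Int × Int)) (data_2 : List (Int × Int)), Dom_alter_values data_1 data_2 → Spec_alter_values data_1 data_2 (alter_values data_1 data_2)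

-- ===== LEMMAS AND PROOFS =====

-- A's inner loop over data_2 appends exactly the matching rows, mapped
theorem inner_loop_eq (i : Int × Int) (data_2 : List (Int × Int)) (acc : List (Int × Int)) :
    data_2.foldl (fun data_3 j => if i.1 == j.1 then data_3 ++ [(i.1, i.2 + j.2)] else data_3) acc
      = acc ++ ((data_2.filter (fun p => p.1 == i.1)).map (·.2)).map (fun w => (i.1, i.2 + w)) := by
  induction data_2 generalizing acc with
  | nil => simp
  | cons j rest ih =>
    simp only [List.foldl_cons, List.filter_cons]
    by_cases h : j.1 = i.1
    · rw [if_pos (by simp [h]), if_pos (by simp [h]), ih]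
      simp [h, List.append_assoc]
    · have h1 : ¬ ((i.1 == j.1) = true) := by
        simp only [beq_iff_eq]; exact fun e => h e.symm
      have h2 : ¬ ((j.1 == i.1) = true) := by simp [h]
      rw [if_neg h1, if_neg h2, ih]

-- unrolling A's outer loop, with the inner loop replaced by its characterisation
theorem outer_loop_eq (data_2 : List (Int × Int)) :
    ∀ (data_1 : List (Int × Int)) (acc : List (Int × Int)),
    data_1.foldl (fun data_3 i =>
        data_2.foldl (fun data_3 j => if i.1 == j.1 then data_3 ++ [(i.1, i.2 + j.2)] else data_3) data_3) acc
      = acc ++ data_1.flatMap (fun p =>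
          ((data_2.filter (fun q => q.1 == p.1)).map (·.2)).map (fun w => (p.1, p.2 + w))) := by
  intro data_1
  induction data_1 with
  | nil => simp
  | cons p rest ih =>
    intro acc
    simp only [List.foldl_cons, List.flatMap_cons]
    rw [inner_loop_eq p data_2 acc, ih, List.append_assoc]

theorem alter_values_spec_aux (data_1 data_2 : List (Int × Int)) :
    alter_values data_1 data_2 = alter_values_alt data_1 data_2 := by
  unfold alter_values alter_values_alt
  simp only [PySem.Dict.getD_foldl_modify_append, PySem.Dict.getD_empty, List.nil_append]
  rw [outer_loop_eq data_2 data_1 []]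
  simp

-- ===== VERDICT (by name: the statement is the Claim_ definition above) =====
theorem alter_values_spec : Claim_equal_alter_values := by
  intro d1 d2 _
  exact alter_values_spec_aux d1 d2
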